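-- pv_equiv track=rewrite | github.com/mal1on/checkio-solutions | Incinerator/Square Board.py | square_board
-- ===== SOURCE A (Python) =====
-- from typing import Tuple
--
-- Coordinate = Tuple[int, int]
--
-- def square_board(side: int, token: int, steps: int) -> Coordinate:
--
--     board = []
--
--     turn = side
--     for x in range(side):
--         turn -= 1
--         board.append((side - 1, turn))
--     turn = side - 1
--     for x in range(side - 2):
--         turn -= 1
--         board.append((turn, 0))
--     turn = -1
--     for x in range(side):
--         turn += 1
--         board.append((0, turn))
--     turn = 0
--     for x in range(side - 2):
--         turn += 1
--         board.append((turn, side - 1))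
--
--     move = token + steps
--     if move >= len(board):
--         move = move % len(board)
--
--     return board[move]
-- ===== SOURCE B (Python) =====
-- def square_board(side: int, token: int, steps: int):
--     # O(1): index the four perimeter segments arithmetically instead of building the board.
--     if side == 1:
--         return (0, 0)
--     m = (token + steps) % (4 * side - 4)
--     if m < side:
--         return (side - 1, side - 1 - m)
--     if m < 2 * side - 2:
--         return (2 * side - 2 - m, 0)
--     if m < 3 * side - 2:
--         return (0, m - (2 * side - 2))
--     return (m - (3 * side - 3), side - 1)
-- ===== Notes on version B (the rewrite author's own statement) =====
-- stated objective: faster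
-- what changed: B computes the perimeter cell directly with O(1) arithmetic over the four board edges (index = (token+steps) mod (4*side-4)) instead of materialising the whole perimeter list and indexing into it.
import Mathlib
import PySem

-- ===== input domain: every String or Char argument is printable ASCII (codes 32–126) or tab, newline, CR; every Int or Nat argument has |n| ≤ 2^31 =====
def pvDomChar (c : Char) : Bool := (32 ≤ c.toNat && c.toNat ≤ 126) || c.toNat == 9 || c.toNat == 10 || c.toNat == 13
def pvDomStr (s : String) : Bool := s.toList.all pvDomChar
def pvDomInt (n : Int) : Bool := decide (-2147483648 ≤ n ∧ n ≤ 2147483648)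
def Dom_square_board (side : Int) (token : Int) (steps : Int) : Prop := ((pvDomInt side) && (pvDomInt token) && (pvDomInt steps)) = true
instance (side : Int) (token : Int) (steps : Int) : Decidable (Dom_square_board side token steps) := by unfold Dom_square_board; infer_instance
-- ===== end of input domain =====

-- B replaces A's O(side) construction of the whole perimeter list by O(1) arithmetic
-- indexing into the four perimeter segments (equal return values; no argument is mutated).

-- ===== PORT A =====
def square_board (side : Int) (token : Int) (steps : Int) : Int × Int :=
  let st1 := (PySem.List.pyRange 0 side 1).foldl
      (fun (st : Int × List (Int × Int)) _ => (st.1 - 1, (side - 1, st.1 - 1) :: st.2)) (side, [])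
  let st2 := (PySem.List.pyRange 0 (side - 2) 1).foldl
      (fun (st : Int × List (Int × Int)) _ => (st.1 - 1, (st.1 - 1, 0) :: st.2)) (side - 1, st1.2)
  let st3 := (PySem.List.pyRange 0 side 1).foldl
      (fun (st : Int × List (Int × Int)) _ => (st.1 + 1, (0, st.1 + 1) :: st.2)) (-1, st2.2)
  let st4 := (PySem.List.pyRange 0 (side - 2) 1).foldl
      (fun (st : Int × List (Int × Int)) _ => (st.1 + 1, (st.1 + 1, side - 1) :: st.2)) (0, st3.2)
  let board := st4.2.reverse   -- lists are grown by cons here and reversed once: Python's O(1) append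
  let move := token + steps
  let move' := if (board.length : Int) ≤ move then PySem.Int.mod move (board.length : Int) else move
  (PySem.List.pyGet? board move').getD (0, 0)   -- board[move]: Pre_ guarantees the index is in range

-- ===== PORT B =====
def square_board_alt (side : Int) (token : Int) (steps : Int) : Int × Int :=
  if side = 1 then (0, 0)
  else
    let m := PySem.Int.mod (token + steps) (4 * side - 4)
    if m < side then (side - 1, side - 1 - m)
    else if m < 2 * side - 2 then (2 * side - 2 - m, 0)
    else if m < 3 * side - 2 then (0, m - (2 * side - 2))
    else (m - (3 * side - 3), side - 1)

-- ===== PRECONDITION & SPEC =====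
-- Pre_ excludes exactly the inputs where A raises: side ≤ 0 (empty board: IndexError, or
-- ZeroDivisionError in the %) and token+steps below -len(board) (IndexError, negative index).
def Pre_square_board (side : Int) (token : Int) (steps : Int) : Prop :=
  1 ≤ side ∧ -(if side = 1 then 2 else 4 * side - 4) ≤ token + steps
instance (side : Int) (token : Int) (steps : Int) : Decidable (Pre_square_board side token steps) := by
  unfold Pre_square_board; infer_instance
def pvWitness_square_board : Int × Int × Int := (3, 2, 5)

def Spec_square_board (side : Int) (token : Int) (steps : Int) (out : Int × Int) : Prop := out = square_board_alt side token steps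
instance (side : Int) (token : Int) (steps : Int) (out : Int × Int) : Decidable (Spec_square_board side token steps out) := by unfold Spec_square_board; infer_instance

-- ===== CLAIM (what is proved, stated in full; the proofs are below) =====
def Claim_equal_square_board : Prop := ∀ (side : Int) (token : Int) (steps : Int), Dom_square_board side token steps → Pre_square_board side token steps → Spec_square_board side token steps (square_board side token steps)
-- ===== LEMMAS AND PROOFS =====

-- the decrementing loops of A: state (turn, acc), each step conses g(turn - 1)
theorem pv_loop_dec (g : Int → Int × Int) :
    ∀ (l : List Int) (t : Int) (acc : List (Int × Int)),
      l.foldl (fun (st : Int × List (Int × Int)) _ => (st.1 - 1, g (st.1 - 1) :: st.2)) (t, acc)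
        = (t - l.length,
           ((List.range l.length).map (fun i : Nat => g (t - 1 - (i : Int)))).reverse ++ acc) := by
  intro l
  induction l with
  | nil => intro t acc; simp
  | cons x xs ih =>
    intro t acc
    simp only [List.foldl_cons, ih (t - 1) (g (t - 1) :: acc), List.length_cons,
      List.range_succ_eq_map, List.map_cons, List.map_map, List.reverse_cons,
      List.append_assoc, List.singleton_append, Prod.mk.injEq]
    refine ⟨by push_cast; ring, ?_⟩
    norm_num
    intro a _
    congr 1
    ring

-- the incrementing loops of A
theorem pv_loop_inc (g : Int → Int × Int) :
    ∀ (l : List Int) (t : Int) (acc : List (Int × Int)),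
      l.foldl (fun (st : Int × List (Int × Int)) _ => (st.1 + 1, g (st.1 + 1) :: st.2)) (t, acc)
        = (t + l.length,
           ((List.range l.length).map (fun i : Nat => g (t + 1 + (i : Int)))).reverse ++ acc) := by
  intro l
  induction l with
  | nil => intro t acc; simp
  | cons x xs ih =>
    intro t acc
    simp only [List.foldl_cons, ih (t + 1) (g (t + 1) :: acc), List.length_cons,
      List.range_succ_eq_map, List.map_cons, List.map_map, List.reverse_cons,
      List.append_assoc, List.singleton_append, Prod.mk.injEq]
    refine ⟨by push_cast; ring, ?_⟩
    norm_num
    intro a _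
    congr 1
    ring

-- the perimeter list A builds, in the normal form the loop lemmas produce
def pvBoard (side : Int) : List (Int × Int) :=
  (List.range side.toNat).map (fun i : Nat => (side - 1, side - 1 - (i : Int))) ++
    ((List.range (side - 2).toNat).map (fun i : Nat => (side - 1 - 1 - (i : Int), (0 : Int))) ++
      ((List.range side.toNat).map (fun i : Nat => ((0 : Int), -1 + 1 + (i : Int))) ++
        (List.range (side - 2).toNat).map (fun i : Nat => ((0 : Int) + 1 + (i : Int), side - 1))))

theorem pv_square_board_eq (side token steps : Int) :
    square_board side token steps =
      (PySem.List.pyGet? (pvBoard side)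
        (if ((pvBoard side).length : Int) ≤ token + steps then
          PySem.Int.mod (token + steps) ((pvBoard side).length : Int)
        else token + steps)).getD (0, 0) := by
  simp only [square_board, pv_loop_dec (fun y => (side - 1, y)),
    pv_loop_dec (fun y => (y, (0 : Int))), pv_loop_inc (fun y => ((0 : Int), y)),
    pv_loop_inc (fun y => (y, side - 1)), PySem.List.length_pyRange_one, sub_zero,
    List.append_nil, List.reverse_append, List.reverse_reverse, List.append_assoc]
  rfl

theorem pvBoard_length (side : Int) (hs : 1 ≤ side) :
    ((pvBoard side).length : Int) = if side = 1 then 2 else 4 * side - 4 := by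
  simp only [pvBoard, List.length_append, List.length_map, List.length_range]
  split <;> omega

theorem pvBoard_get? (side : Int) (hs : 2 ≤ side) (k : Nat) (hk : (k : Int) < 4 * side - 4) :
    (pvBoard side)[k]? = some
      (if (k : Int) < side then (side - 1, side - 1 - (k : Int))
       else if (k : Int) < 2 * side - 2 then (2 * side - 2 - (k : Int), 0)
       else if (k : Int) < 3 * side - 2 then (0, (k : Int) - (2 * side - 2))
       else ((k : Int) - (3 * side - 3), side - 1)) := by
  unfold pvBoard
  by_cases h1 : (k : Int) < side
  · rw [List.getElem?_append_left (by simp; omega)]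
    simp only [List.getElem?_map]
    rw [List.getElem?_range (by omega)]
    simp [h1]
  · rw [List.getElem?_append_right (by simp; omega)]
    by_cases h2 : (k : Int) < 2 * side - 2
    · rw [List.getElem?_append_left (by simp; omega)]
      simp only [List.getElem?_map, List.length_map, List.length_range]
      rw [List.getElem?_range (by omega)]
      simp only [Option.map_some]
      rw [if_neg h1, if_pos h2]
      congr 2 <;> push_cast <;> omega
    · rw [List.getElem?_append_right (by simp; omega)]
      by_cases h3 : (k : Int) < 3 * side - 2
      · rw [List.getElem?_append_left (by simp; omega)]
        simp only [List.getElem?_map, List.length_map, List.length_range]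
        rw [List.getElem?_range (by omega)]
        simp only [Option.map_some]
        rw [if_neg h1, if_neg h2, if_pos h3]
        congr 2 <;> push_cast <;> omega
      · rw [List.getElem?_append_right (by simp; omega)]
        simp only [List.getElem?_map, List.length_map, List.length_range]
        rw [List.getElem?_range (by omega)]
        simp only [Option.map_some]
        rw [if_neg h1, if_neg h2, if_neg h3]
        congr 2 <;> push_cast <;> omega

-- Python indexing 'board[move]' with the conditional % of A, as one emod-based access
theorem pv_index (xs : List (Int × Int)) (mv : Int) (hlen : 0 < (xs.length : Int))
    (hmv : -(xs.length : Int) ≤ mv) :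
    (PySem.List.pyGet? xs
        (if (xs.length : Int) ≤ mv then PySem.Int.mod mv (xs.length : Int) else mv)).getD (0, 0)
      = xs.getD (mv % (xs.length : Int)).toNat (0, 0) := by
  by_cases hge : (xs.length : Int) ≤ mv
  · rw [if_pos hge, PySem.Int.mod_eq_emod_of_pos hlen,
      PySem.List.pyGet?_of_nonneg _ (Int.emod_nonneg mv (show (xs.length : Int) ≠ 0 by omega)),
      List.getD_eq_getElem?_getD]
  · rw [if_neg hge]
    by_cases hnn : 0 ≤ mv
    · rw [PySem.List.pyGet?_of_nonneg _ hnn, Int.emod_eq_of_lt hnn (by omega),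
        List.getD_eq_getElem?_getD]
    · have hk : mv = -(((-mv).toNat : Nat) : Int) := by omega
      have h1 : (mv + (xs.length : Int)) % (xs.length : Int) = mv % (xs.length : Int) := by
        have := Int.add_mul_emod_self_left mv (xs.length : Int) 1
        rwa [mul_one] at this
      have h2 : (mv + (xs.length : Int)) % (xs.length : Int) = mv + xs.length :=
        Int.emod_eq_of_lt (by omega) (by omega)
      have hmod : mv % (xs.length : Int) = mv + xs.length := by omega
      have hget : PySem.List.pyGet? xs mv = xs[xs.length - (-mv).toNat]? := by
        conv_lhs => rw [hk]
        exact PySem.List.pyGet?_neg_natCast xs ((-mv).toNat) (by omega) (by omega)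
      rw [hget, hmod, List.getD_eq_getElem?_getD]
      congr 2
      omega

-- ===== VERDICT (by name: the statement is the Claim_ definition above) =====
theorem square_board_spec : Claim_equal_square_board := by
  intro side token steps _ hpre
  obtain ⟨hs, hmv⟩ := hpre
  unfold Spec_square_board
  rw [pv_square_board_eq]
  have hlen := pvBoard_length side hs
  by_cases h1 : side = 1
  · subst h1
    norm_num at hlen hmv
    have hB : pvBoard 1 = [(0, 0), (0, 0)] := by decide
    rw [hlen, hB]
    have halt : square_board_alt 1 token steps = (0, 0) := by simp [square_board_alt]
    rw [halt]
    by_cases hge : (2 : Int) ≤ token + steps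
    · rw [if_pos hge]
      have h0 := PySem.Int.mod_nonneg (token + steps) (b := 2) (by omega)
      have h2 := PySem.Int.mod_lt (token + steps) (b := 2) (by omega)
      rcases (by omega : PySem.Int.mod (token + steps) 2 = 0 ∨ PySem.Int.mod (token + steps) 2 = 1) with h | h <;>
        rw [h] <;> decide
    · rw [if_neg hge]
      rcases (by omega : token + steps = -2 ∨ token + steps = -1 ∨ token + steps = 0 ∨ token + steps = 1) with h | h | h | h <;>
        rw [h] <;> decide
  · have hs2 : 2 ≤ side := by omega
    rw [if_neg h1] at hlen hmv
    rw [pv_index (pvBoard side) (token + steps) (by omega) (by omega), hlen]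
    have hm0 : 0 ≤ (token + steps) % (4 * side - 4) := Int.emod_nonneg _ (by omega)
    have hmL : (token + steps) % (4 * side - 4) < 4 * side - 4 := by
      exact Int.emod_lt_of_pos (token + steps) (by omega)
    rw [List.getD_eq_getElem?_getD,
      pvBoard_get? side hs2 (((token + steps) % (4 * side - 4)).toNat) (by omega)]
    have hcast : ((((token + steps) % (4 * side - 4)).toNat : Nat) : Int)
        = PySem.Int.mod (token + steps) (4 * side - 4) := by
      rw [PySem.Int.mod_eq_emod_of_pos (show (0:Int) < 4 * side - 4 by omega)]
      exact Int.toNat_of_nonneg hm0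
    rw [Option.getD_some, hcast]
    simp only [square_board_alt, if_neg h1]
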